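-- pv_equiv track=rewrite | github.com/HelinaBerhane/chocolate | chocolate.py | remove_pairs_of_requests
-- ===== SOURCE A (Python) =====
-- def remove_pairs_of_requests(bars, requests, final_bars):
--     '''resolves any pair of requests that fit perfectly in a bar'''
--     cuts = 0
--     finished = False
--     while requests != [] and not finished:
--         for i, a in enumerate(requests):
--             for j, b in enumerate(requests):
--                 if i != j:
--                     sum = (a + b)
--                     if sum in bars:
--                         cuts += 1
--                         final_bars.append([requests[j]])
--                         final_bars.append([requests[i]])
--                         del bars[bars.index(sum)]
--                         del requests[j]
--                         del requests[i]
--                         break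
--             else:
--                 continue
--             break
--         else:
--             finished = True
--     else:
--         return cuts
-- ===== SOURCE B (Python) =====
-- def remove_pairs_of_requests(bars, requests, final_bars):
--     '''resolves any pair of requests that fit perfectly in a bar'''
--     # counted bars give O(1) membership; each request is visited once:
--     # once a request has no partner it can never gain one (bars and
--     # requests only shrink), so the scan never restarts.
--     counts = {}
--     for bar in bars:
--         counts[bar] = counts.get(bar, 0) + 1
--     cuts = 0
--     survivors = []
--     pending = requests[:]
--     while pending:
--         a = pending.pop(0)
--         for j in range(len(pending)):
--             b = pending[j]
--             if counts.get(a + b, 0) > 0: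
--                 cuts += 1
--                 final_bars.append([b])
--                 final_bars.append([a])
--                 counts[a + b] -= 1
--                 bars.remove(a + b)
--                 del pending[j]
--                 break
--         else:
--             survivors.append(a)
--     requests[:] = survivors + pending
--     return cuts
-- ===== Notes on version B (the rewrite author's own statement) =====
-- stated objective: faster
-- what changed: Replaced A's restart-from-scratch double scan with linear `in bars` membership by a counted-bars dictionary plus a single left-to-right scan over the requests that never restarts (a request that once had no partner can never gain one, since bars and requests only shrink).
import Mathlib
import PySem

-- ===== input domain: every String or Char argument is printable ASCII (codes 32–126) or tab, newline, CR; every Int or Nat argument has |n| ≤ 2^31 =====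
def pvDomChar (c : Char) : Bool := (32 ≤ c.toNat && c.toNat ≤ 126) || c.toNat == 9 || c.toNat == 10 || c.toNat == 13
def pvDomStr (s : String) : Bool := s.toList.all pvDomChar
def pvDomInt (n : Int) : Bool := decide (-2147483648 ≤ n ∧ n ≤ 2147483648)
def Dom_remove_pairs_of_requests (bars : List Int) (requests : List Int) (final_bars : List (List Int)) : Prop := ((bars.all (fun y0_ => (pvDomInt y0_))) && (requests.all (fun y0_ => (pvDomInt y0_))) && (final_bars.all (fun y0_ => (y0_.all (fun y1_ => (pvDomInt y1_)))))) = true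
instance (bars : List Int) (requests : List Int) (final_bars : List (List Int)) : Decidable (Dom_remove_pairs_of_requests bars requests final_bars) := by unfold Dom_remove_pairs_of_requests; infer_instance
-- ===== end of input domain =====

-- B replaces A's restart-from-scratch pair search (restart after every removal, linear `in bars`
-- membership) by a counted-bars dictionary and a single left-to-right scan that never restarts.
-- Both Pythons mutate `bars`/`requests`/`final_bars` identically; the theorems are about the
-- returned cut count (`final_bars` is write-only in both, hence unused by the ports).

-- ===== PORT A =====
-- inner `for j, b in enumerate(requests)` of A: first j (scanning from j) with j ≠ i and a + requests[j] in bars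
def innerA (bars reqs : List Int) (i : Nat) (a : Int) (j : Nat) : Option (Nat × Int) :=
  if h : j < reqs.length then
    if j ≠ i ∧ (a + reqs[j]) ∈ bars then some (j, reqs[j])
    else innerA bars reqs i a (j + 1)
  else none
termination_by reqs.length - j

-- outer `for i, a in enumerate(requests)` of A: first (i, a, j, b) whose inner scan breaks
def outerA (bars reqs : List Int) (i : Nat) : Option (Nat × Int × Nat × Int) :=
  if h : i < reqs.length then
    match innerA bars reqs i reqs[i] 0 with
    | some (j, b) => some (i, reqs[i], j, b)
    | none => outerA bars reqs (i + 1)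
  else none
termination_by reqs.length - i

-- needed by whileA's termination proof
lemma innerA_some_lt {bars reqs : List Int} {i : Nat} {a : Int} {j j' : Nat} {b : Int}
    (h : innerA bars reqs i a j = some (j', b)) : j' < reqs.length := by
  fun_induction innerA bars reqs i a j with
  | case1 j h1 h2 => simp at h; omega
  | case2 j h1 h2 ih => exact ih h
  | case3 j h1 => simp [] at h

lemma outerA_some_lt {bars reqs : List Int} {i i0 j : Nat} {a b : Int}
    (h : outerA bars reqs i = some (i0, a, j, b)) : j < reqs.length := by
  fun_induction outerA bars reqs i with
  | case1 i h1 j' b' hinner =>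
    simp at h
    obtain ⟨_, _, hj, _⟩ := h
    subst hj; exact innerA_some_lt hinner
  | case2 i h1 hinner ih => exact ih h
  | case3 i h1 => simp at h

-- A's `while requests != [] and not finished` loop; each pass either removes a pair or finishes
def whileA (bars reqs : List Int) (cuts : Int) : Int :=
  if reqs = [] then cuts
  else
    match hm : outerA bars reqs 0 with
    | none => cuts
    | some (i, a, j, b) =>
        whileA (bars.erase (a + b)) ((reqs.eraseIdx j).eraseIdx i) (cuts + 1)
termination_by reqs.length
decreasing_by
  have hj : j < reqs.length := outerA_some_lt hm
  have h1 : (reqs.eraseIdx j).length = reqs.length - 1 := by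
    rw [List.length_eraseIdx]; simp [hj]
  have h2 : ((reqs.eraseIdx j).eraseIdx i).length ≤ (reqs.eraseIdx j).length := by
    rw [List.length_eraseIdx]; split <;> omega
  omega

def remove_pairs_of_requests (bars : List Int) (requests : List Int) (final_bars : List (List Int)) : Int :=
  whileA bars requests 0

-- ===== PORT B =====
-- `counts = {}; for bar in bars: counts[bar] = counts.get(bar, 0) + 1`
def buildCounts (bars : List Int) : PySem.Dict Int Int :=
  bars.foldl (fun d x => d.insert x (d.getD x 0 + 1)) PySem.Dict.empty

-- B's inner `for j in range(len(pending))`: first j (from j) with counts.get(a + pending[j], 0) > 0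
def innerB (counts : PySem.Dict Int Int) (pending : List Int) (a : Int) (j : Nat) : Option (Nat × Int) :=
  if h : j < pending.length then
    if counts.getD (a + pending[j]) 0 > 0 then some (j, pending[j])
    else innerB counts pending a (j + 1)
  else none
termination_by pending.length - j

-- B's `while pending:` loop — pop the front request, match it against the counted bars once.
-- (`survivors`, `bars.remove` and the `final_bars` appends only feed the in-place mutations,
-- which do not affect the returned count, so they carry no state here.)
def loopB (counts : PySem.Dict Int Int) (pending : List Int) (cuts : Int) : Int :=
  match pending with
  | [] => cuts
  | a :: rest =>
    match innerB counts rest a 0 with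
    | some (j, b) => loopB (counts.modify (a + b) 0 (· - 1)) (rest.eraseIdx j) (cuts + 1)
    | none => loopB counts rest cuts
termination_by pending.length
decreasing_by
  · have : (rest.eraseIdx j).length ≤ rest.length := by
      rw [List.length_eraseIdx]; split <;> omega
    simp; omega
  · simp

def remove_pairs_of_requests_alt (bars : List Int) (requests : List Int) (final_bars : List (List Int)) : Int :=
  loopB (buildCounts bars) requests 0

-- ===== PRECONDITION & SPEC =====
def Spec_remove_pairs_of_requests (bars : List Int) (requests : List Int) (final_bars : List (List Int)) (out : Int) : Prop := out = remove_pairs_of_requests_alt bars requests final_bars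
instance (bars : List Int) (requests : List Int) (final_bars : List (List Int)) (out : Int) : Decidable (Spec_remove_pairs_of_requests bars requests final_bars out) := by unfold Spec_remove_pairs_of_requests; infer_instance

-- ===== CLAIM (what is proved, stated in full; the proofs are below) =====
def Claim_equal_remove_pairs_of_requests : Prop := ∀ (bars : List Int) (requests : List Int) (final_bars : List (List Int)), Dom_remove_pairs_of_requests bars requests final_bars → Spec_remove_pairs_of_requests bars requests final_bars (remove_pairs_of_requests bars requests final_bars)

-- ===== LEMMAS AND PROOFS =====

-- Invariant tying B's scan position to A's restarts: no request strictly before position L of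
-- reqs has a partner anywhere in reqs (at a different position) whose sum is an available bar.
def NoPair (bars reqs : List Int) (L : Nat) : Prop :=
  ∀ (p q : Nat) (hp : p < reqs.length) (hq : q < reqs.length),
    p < L → p ≠ q → reqs[p] + reqs[q] ∉ bars

lemma innerA_eq_none {bars reqs : List Int} {i : Nat} {a : Int} {j : Nat}
    (h : ∀ (k : Nat) (hk : k < reqs.length), j ≤ k → k ≠ i → a + reqs[k] ∉ bars) :
    innerA bars reqs i a j = none := by
  fun_induction innerA bars reqs i a j with
  | case1 j h1 h2 => exact absurd h2.2 (h j h1 le_rfl h2.1)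
  | case2 j h1 h2 ih => exact ih (fun k hk hjk hki => h k hk (by omega) hki)
  | case3 j h1 => rfl

lemma innerA_eq_some {bars reqs : List Int} {i : Nat} {a : Int} {j j' : Nat}
    (hj : j ≤ j') (hj' : j' < reqs.length) (hne : j' ≠ i) (hmem : a + reqs[j'] ∈ bars)
    (hmin : ∀ (k : Nat) (hk : k < reqs.length), j ≤ k → k < j' → k ≠ i → a + reqs[k] ∉ bars) :
    innerA bars reqs i a j = some (j', reqs[j']) := by
  fun_induction innerA bars reqs i a j with
  | case1 j h1 h2 =>
    rcases Nat.lt_or_ge j j' with hlt | hge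
    · exact absurd h2.2 (hmin j h1 le_rfl hlt h2.1)
    · have : j = j' := by omega
      subst this; rfl
  | case2 j h1 h2 ih =>
    have hjj : j ≠ j' := by
      rintro rfl; exact h2 ⟨hne, hmem⟩
    exact ih (by omega) (fun k hk hjk hkj' hki => hmin k hk (by omega) hkj' hki)
  | case3 j h1 => omega

lemma outerA_eq_none {bars reqs : List Int} {i : Nat}
    (h : ∀ (i' : Nat) (hi' : i' < reqs.length), i ≤ i' → innerA bars reqs i' reqs[i'] 0 = none) :
    outerA bars reqs i = none := by
  fun_induction outerA bars reqs i with
  | case1 i h1 j' b' hinner => rw [h i h1 le_rfl] at hinner; exact absurd hinner (by simp)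
  | case2 i h1 hinner ih => exact ih (fun i' hi' hii => h i' hi' (by omega))
  | case3 i h1 => rfl

lemma outerA_eq_some {bars reqs : List Int} {i i0 j : Nat} {b : Int}
    (hi : i ≤ i0) (hi0 : i0 < reqs.length)
    (hsome : innerA bars reqs i0 reqs[i0] 0 = some (j, b))
    (hmin : ∀ (i' : Nat) (hi' : i' < reqs.length), i ≤ i' → i' < i0 → innerA bars reqs i' reqs[i'] 0 = none) :
    outerA bars reqs i = some (i0, reqs[i0], j, b) := by
  fun_induction outerA bars reqs i with
  | case1 i h1 j' b' hinner =>
    rcases Nat.lt_or_ge i i0 with hlt | hge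
    · rw [hmin i h1 le_rfl hlt] at hinner; exact absurd hinner (by simp)
    · have : i = i0 := by omega
      subst this
      rw [hsome] at hinner
      simp at hinner
      simp [hinner]
  | case2 i h1 hinner ih =>
    have hii : i ≠ i0 := by
      rintro rfl; rw [hsome] at hinner; exact absurd hinner (by simp)
    exact ih (by omega) (fun i' hi' h' h'' => hmin i' hi' (by omega) h'')
  | case3 i h1 => omega

lemma innerB_none {counts : PySem.Dict Int Int} {pending : List Int} {a : Int} {j : Nat}
    (h : innerB counts pending a j = none) :
    ∀ (k : Nat) (hk : k < pending.length), j ≤ k → ¬(counts.getD (a + pending[k]) 0 > 0) := by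
  fun_induction innerB counts pending a j with
  | case1 j h1 h2 => simp at h
  | case2 j h1 h2 ih =>
    intro k hk hjk
    rcases Nat.eq_or_lt_of_le hjk with rfl | hlt
    · exact h2
    · exact ih h k hk (by omega)
  | case3 j h1 => intro k hk hjk; omega

lemma innerB_some {counts : PySem.Dict Int Int} {pending : List Int} {a : Int} {j j' : Nat} {b : Int}
    (h : innerB counts pending a j = some (j', b)) :
    j ≤ j' ∧ ∃ (hj' : j' < pending.length), b = pending[j'] ∧
      counts.getD (a + pending[j']) 0 > 0 ∧
      ∀ (k : Nat) (hk : k < pending.length), j ≤ k → k < j' → ¬(counts.getD (a + pending[k]) 0 > 0) := by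
  fun_induction innerB counts pending a j with
  | case1 j h1 h2 =>
    simp at h
    obtain ⟨rfl, rfl⟩ := h
    exact ⟨le_rfl, h1, rfl, h2, fun k hk h3 h4 => by omega⟩
  | case2 j h1 h2 ih =>
    obtain ⟨hle, hj', hb, hpos, hmin⟩ := ih h
    refine ⟨by omega, hj', hb, hpos, ?_⟩
    intro k hk hjk hkj'
    rcases Nat.eq_or_lt_of_le hjk with rfl | hlt
    · exact h2
    · exact hmin k hk (by omega) hkj'
  | case3 j h1 => simp at h

-- the main loop invariant: A's full restart loop on survivors ++ pending computes the same
-- cut count as B's single scan over pending, given matching bar counts and the NoPair invariant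
lemma get_app_cons {xs : List Int} {y : Int} {ys : List Int} {q : Nat} (h : q < (xs ++ y :: ys).length) :
    (xs ++ y :: ys)[q] = if hq : q < xs.length then xs[q]
      else if h2 : q = xs.length then y
      else ys[q - xs.length - 1]'(by simp at h ⊢; omega) := by
  split
  · next hq => exact List.getElem_append_left hq
  · next hq =>
    split
    · next h2 => subst h2; rw [List.getElem_append_right le_rfl]; simp
    · next h2 =>
      rw [List.getElem_append_right (by omega)]
      have he : q - xs.length = (q - xs.length - 1) + 1 := by omega
      rw [getElem_congr rfl he (by simp at h ⊢; omega)]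
      exact List.getElem_cons_succ ..

lemma loopB_nil {counts : PySem.Dict Int Int} {cuts : Int} : loopB counts [] cuts = cuts := by
  rw [loopB]

lemma loopB_cons_none {counts : PySem.Dict Int Int} {a : Int} {rest : List Int} {cuts : Int}
    (h : innerB counts rest a 0 = none) : loopB counts (a :: rest) cuts = loopB counts rest cuts := by
  rw [loopB, h]

lemma loopB_cons_some {counts : PySem.Dict Int Int} {a : Int} {rest : List Int} {cuts : Int}
    {j : Nat} {b : Int} (h : innerB counts rest a 0 = some (j, b)) :
    loopB counts (a :: rest) cuts = loopB (counts.modify (a + b) 0 (· - 1)) (rest.eraseIdx j) (cuts + 1) := by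
  rw [loopB, h]

-- the main loop invariant: A's full restart loop on survivors ++ pending computes the same
-- cut count as B's single scan over pending, given matching bar counts and the NoPair invariant
lemma main_loop : ∀ (n : Nat) (pending : List Int), pending.length = n →
    ∀ (survivors bars : List Int) (counts : PySem.Dict Int Int) (cuts : Int),
    (∀ s : Int, counts.getD s 0 = (bars.count s : Int)) →
    NoPair bars (survivors ++ pending) survivors.length →
    whileA bars (survivors ++ pending) cuts = loopB counts pending cuts := by
  intro n
  induction n using Nat.strong_induction_on with
  | _ n IH =>
  intro pending hlen survivors bars counts cuts hcnt hnp
  cases pending with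
  | nil =>
    simp only [List.append_nil] at hnp ⊢
    rw [loopB_nil, whileA]
    by_cases hs : survivors = []
    · simp [hs]
    · rw [if_neg hs]
      have houter : outerA bars survivors 0 = none :=
        outerA_eq_none (fun i' hi' _ => innerA_eq_none
          (fun k hk _ hki => hnp i' k hi' hk hi' (fun he => hki he.symm)))
      split
      · rfl
      · next heq => rw [houter] at heq; cases heq
  | cons a rest =>
    cases hIB : innerB counts rest a 0 with
    | none =>
      have hnb : ∀ (k : Nat) (hk : k < rest.length), a + rest[k] ∉ bars := by
        intro k hk hmem
        have h1 := innerB_none hIB k hk (Nat.zero_le _)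
        rw [hcnt] at h1
        have h2 : 0 < bars.count (a + rest[k]) := List.count_pos_iff.mpr hmem
        omega
      have hnp1 : NoPair bars (survivors ++ a :: rest) (survivors.length + 1) := by
        intro p q hp hq hpL hpq
        rcases Nat.lt_trichotomy p survivors.length with hpl | hpl | hpl
        · exact hnp p q hp hq hpl hpq
        · rcases Nat.lt_trichotomy q survivors.length with hq1 | hq1 | hq1
          · intro hm
            rw [Int.add_comm] at hm
            exact hnp q p hq hp hq1 (fun he => hpq he.symm) hm
          · omega
          · have hk2 : q - survivors.length - 1 < rest.length := by simp at hq; omega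
            rw [get_app_cons hp, dif_neg (by omega), dif_pos hpl,
              get_app_cons hq, dif_neg (by omega), dif_neg (by omega)]
            exact hnb _ hk2
        · omega
      have hnp' : NoPair bars ((survivors ++ [a]) ++ rest) (survivors ++ [a]).length := by
        rw [List.append_assoc, List.singleton_append, List.length_append, List.length_singleton]
        exact hnp1
      have hA : survivors ++ a :: rest = (survivors ++ [a]) ++ rest := by
        rw [List.append_assoc, List.singleton_append]
      rw [hA, IH rest.length (by simp at hlen; omega) rest rfl (survivors ++ [a]) bars counts cuts hcnt hnp',
        loopB_cons_none hIB]
    | some jb =>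
      obtain ⟨j, b⟩ := jb
      obtain ⟨-, hj, hb, hpos, hmin⟩ := innerB_some hIB
      subst hb
      have hlenreq : (survivors ++ a :: rest).length = survivors.length + 1 + rest.length := by
        simp; omega
      have hmem : a + rest[j] ∈ bars := by
        rw [hcnt] at hpos
        exact List.count_pos_iff.mp (by exact_mod_cast hpos)
      have eL : (survivors ++ a :: rest)[survivors.length]'(by omega) = a := by
        rw [get_app_cons, dif_neg (by omega), dif_pos rfl]
      have eJ : (survivors ++ a :: rest)[survivors.length + 1 + j]'(by omega) = rest[j] := by
        rw [get_app_cons, dif_neg (by omega), dif_neg (by omega)]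
        exact getElem_congr rfl (by omega) (by omega)
      have hinner : innerA bars (survivors ++ a :: rest) survivors.length
          ((survivors ++ a :: rest)[survivors.length]'(by omega)) 0
          = some (survivors.length + 1 + j, (survivors ++ a :: rest)[survivors.length + 1 + j]'(by omega)) := by
        apply innerA_eq_some (Nat.zero_le _) (by omega) (by omega)
        · rw [eL, eJ]; exact hmem
        · intro k hk _ hkj hki
          rcases Nat.lt_trichotomy k survivors.length with h1 | h1 | h1
          · intro hm
            rw [eL] at hm
            exact hnp k survivors.length hk (by omega) h1 (by omega)
              (by rw [eL, Int.add_comm]; exact hm)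
          · omega
          · have hk' : k - survivors.length - 1 < rest.length := by omega
            have ek : (survivors ++ a :: rest)[k] = rest[k - survivors.length - 1] := by
              rw [get_app_cons, dif_neg (by omega), dif_neg (by omega)]
            rw [eL, ek]
            intro hm
            have h2 := hmin (k - survivors.length - 1) hk' (Nat.zero_le _) (by omega)
            rw [hcnt] at h2
            have h3 : 0 < bars.count (a + rest[k - survivors.length - 1]) := List.count_pos_iff.mpr hm
            omega
      have houter : outerA bars (survivors ++ a :: rest) 0
          = some (survivors.length, (survivors ++ a :: rest)[survivors.length]'(by omega),
              survivors.length + 1 + j, (survivors ++ a :: rest)[survivors.length + 1 + j]'(by omega)) := by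
        apply outerA_eq_some (Nat.zero_le _) (by omega) hinner
        intro i' hi' _ hi'L
        exact innerA_eq_none (fun k hk _ hki => hnp i' k hi' hk hi'L (fun he => hki he.symm))
      have hne : survivors ++ a :: rest ≠ [] := by simp
      rw [whileA, if_neg hne]
      split
      · next heq => rw [houter] at heq; cases heq
      · next i0 a0 j0 b0 heq =>
        rw [houter] at heq
        simp only [Option.some.injEq, Prod.mk.injEq] at heq
        obtain ⟨rfl, rfl, rfl, rfl⟩ := heq
        rw [eL, eJ]
        have e1 : (((survivors ++ a :: rest).eraseIdx (survivors.length + 1 + j)).eraseIdx survivors.length)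
            = survivors ++ rest.eraseIdx j := by
          rw [List.eraseIdx_append_of_length_le (by omega)]
          have hx : survivors.length + 1 + j - survivors.length = j + 1 := by omega
          rw [hx, List.eraseIdx_cons_succ, List.eraseIdx_append_of_length_le le_rfl]
          simp
        rw [e1]
        have hcnt' : ∀ t : Int, ((counts.modify (a + rest[j]) 0 (· - 1)).getD t 0)
            = ((bars.erase (a + rest[j])).count t : Int) := by
          intro t
          rw [PySem.Dict.getD_modify]
          by_cases ht : t = a + rest[j]
          · subst ht
            rw [if_pos rfl, hcnt, List.count_erase_self]
            have h4 : 0 < bars.count (a + rest[j]) := List.count_pos_iff.mpr hmem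
            omega
          · rw [if_neg ht, hcnt, List.count_erase_of_ne ht]
        have hnp2 : NoPair (bars.erase (a + rest[j])) (survivors ++ rest.eraseIdx j) survivors.length := by
          intro p q hp hq hpL hpq hm
          have hm' := List.mem_of_mem_erase hm
          have hlen2 : (survivors ++ rest.eraseIdx j).length = survivors.length + (rest.eraseIdx j).length := by
            simp
          have hje : (rest.eraseIdx j).length = rest.length - 1 := by
            rw [List.length_eraseIdx]; simp [hj]
          have hq2 := hq
          rw [hlen2, hje] at hq2
          have ep : (survivors ++ rest.eraseIdx j)[p] = survivors[p]'(by omega) :=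
            List.getElem_append_left (by omega)
          rcases Nat.lt_or_ge q survivors.length with hq1 | hq1
          · have eq1 : (survivors ++ rest.eraseIdx j)[q] = survivors[q]'(by omega) :=
              List.getElem_append_left (by omega)
            rw [ep, eq1] at hm'
            refine hnp p q (by omega) (by omega) hpL hpq ?_
            rw [List.getElem_append_left (by omega), List.getElem_append_left (by omega)]
            exact hm'
          · have eq1 : (survivors ++ rest.eraseIdx j)[q] = (rest.eraseIdx j)[q - survivors.length]'(by omega) :=
              List.getElem_append_right (by omega)
            rw [List.getElem_eraseIdx] at eq1
            split at eq1
            · next hlt =>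
              rw [ep, eq1] at hm'
              refine hnp p (survivors.length + 1 + (q - survivors.length)) (by omega) (by omega) hpL (by omega) ?_
              rw [List.getElem_append_left (by omega), get_app_cons, dif_neg (by omega), dif_neg (by omega)]
              have hidx : survivors.length + 1 + (q - survivors.length) - survivors.length - 1 = q - survivors.length := by omega
              rw [getElem_congr rfl hidx (by omega)]
              exact hm'
            · next hlt =>
              rw [ep, eq1] at hm'
              refine hnp p (survivors.length + 1 + (q - survivors.length + 1)) (by omega) (by omega) hpL (by omega) ?_
              rw [List.getElem_append_left (by omega), get_app_cons, dif_neg (by omega), dif_neg (by omega)]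
              have hidx : survivors.length + 1 + (q - survivors.length + 1) - survivors.length - 1 = q - survivors.length + 1 := by omega
              rw [getElem_congr rfl hidx (by omega)]
              exact hm'
        rw [IH (rest.eraseIdx j).length
          (by rw [List.length_eraseIdx]; simp [hj] at hlen ⊢; omega)
          (rest.eraseIdx j) rfl survivors (bars.erase (a + rest[j]))
          (counts.modify (a + rest[j]) 0 (· - 1)) (cuts + 1) hcnt' hnp2,
          loopB_cons_some hIB]

theorem remove_pairs_of_requests_spec : Claim_equal_remove_pairs_of_requests := by
  intro bars requests final_bars _
  unfold Spec_remove_pairs_of_requests remove_pairs_of_requests remove_pairs_of_requests_alt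
  exact main_loop requests.length requests rfl [] bars (buildCounts bars) 0
    (fun s => by simp [buildCounts, PySem.Dict.getD_foldl_insert_add_one, PySem.Dict.getD_empty])
    (fun p q hp hq hpL hpq => absurd hpL (by simp))
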